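-- pv_equiv track=rewrite | github.com/politrons/single_model_use_case | shared/contract_utilities/generate_contract.py | _strip_module_docstring
-- ===== SOURCE A (Python) =====
-- def _strip_module_docstring(body_lines: list[str]) -> list[str]:
--     """
--     Remove the leading triple-quoted module docstring from a list of lines,
--     if one is present. Returns the remaining lines.
--     """
--     result: list[str] = []
--     in_docstring = False
--     docstring_done = False
--
--     for line in body_lines:
--         stripped = line.strip()
--
--         if not docstring_done:
--             if not in_docstring and stripped.startswith('"""'):
--                 in_docstring = True
--                 # Single-line docstring: opens and closes on the same line
--                 if stripped.endswith('"""') and len(stripped) > 6: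
--                     docstring_done = True
--                 continue
--             if in_docstring:
--                 if stripped.endswith('"""'):
--                     docstring_done = True
--                 continue
--             if stripped:
--                 docstring_done = True
--                 result.append(line)
--         else:
--             result.append(line)
--
--     return result
-- ===== SOURCE B (Python) =====
-- def _strip_module_docstring(body_lines: list[str]) -> list[str]:
--     n = len(body_lines)
--     # phase 1: skip leading blank lines
--     i = 0
--     while i < n and not body_lines[i].strip():
--         i += 1
--     if i == n:
--         return []
--     s = body_lines[i].strip()
--     if not s.startswith('"""'):
--         return body_lines[i:]
--     # single-line docstring: opens and closes on the same line
--     if s.endswith('"""') and len(s) > 6: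
--         return body_lines[i + 1:]
--     # phase 2: find the closing line of the multi-line docstring
--     j = i + 1
--     while j < n and not body_lines[j].strip().endswith('"""'):
--         j += 1
--     if j == n:
--         return []
--     return body_lines[j + 1:]
-- ===== Notes on version B (the rewrite author's own statement) =====
-- stated objective: simpler
-- what changed: Replaces the single flag-driven accumulation loop (in_docstring/docstring_done state machine appending line by line) with explicit phases: skip leading blanks, classify the first non-blank line, scan for the closing quotes, then return a slice of the input.
import Mathlib
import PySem

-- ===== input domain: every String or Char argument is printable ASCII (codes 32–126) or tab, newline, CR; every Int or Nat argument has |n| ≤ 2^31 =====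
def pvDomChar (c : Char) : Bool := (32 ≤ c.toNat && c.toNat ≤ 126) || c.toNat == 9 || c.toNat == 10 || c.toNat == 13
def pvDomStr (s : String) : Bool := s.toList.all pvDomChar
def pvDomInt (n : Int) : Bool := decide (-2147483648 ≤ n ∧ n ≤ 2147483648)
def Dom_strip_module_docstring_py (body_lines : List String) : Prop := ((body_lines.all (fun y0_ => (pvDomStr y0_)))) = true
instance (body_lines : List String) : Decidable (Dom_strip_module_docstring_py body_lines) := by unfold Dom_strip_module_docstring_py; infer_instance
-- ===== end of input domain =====

-- B replaces A's flag-driven accumulation loop with explicit phases (skip blanks,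
-- classify the opener, scan for the closing quotes, slice); objective: simpler.


-- ===== PORT A =====
-- state: (result, in_docstring, docstring_done); the loop body follows A branch for branch
def pvStepA (st : List String × Bool × Bool) (line : String) : List String × Bool × Bool :=
  let result := st.1
  let in_docstring := st.2.1
  let docstring_done := st.2.2
  let stripped := PySem.Str.strip line
  if ¬ docstring_done then
    if ¬ in_docstring ∧ PySem.Str.startswith stripped "\"\"\"" then
      (result, true,
        PySem.Str.endswith stripped "\"\"\"" && decide (PySem.Str.len stripped > 6))
    else if in_docstring then
      (result, in_docstring, PySem.Str.endswith stripped "\"\"\"")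
    else if stripped ≠ "" then
      (result ++ [line], in_docstring, true)
    else
      (result, in_docstring, docstring_done)
  else
    (result ++ [line], in_docstring, docstring_done)

def strip_module_docstring_py (body_lines : List String) : List String :=
  (body_lines.foldl pvStepA ([], false, false)).1

-- ===== PORT B =====
-- phase 1 of Source B: the while loop skipping leading blank lines (the slice body_lines[i:] is the suffix it stops at)
def pvSkipBlank : List String → List String
  | [] => []
  | l :: ls => if PySem.Str.strip l = "" then pvSkipBlank ls else l :: ls

-- phase 2 of Source B: the while loop looking for the closing '"""' line; [] if it never closes
def pvFindClose : List String → List String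
  | [] => []
  | l :: ls => if PySem.Str.endswith (PySem.Str.strip l) "\"\"\"" then ls else pvFindClose ls

def strip_module_docstring_py_alt (body_lines : List String) : List String :=
  match pvSkipBlank body_lines with
  | [] => []
  | l :: ls =>
    let s := PySem.Str.strip l
    if ¬ PySem.Str.startswith s "\"\"\"" then l :: ls
    else if PySem.Str.endswith s "\"\"\"" ∧ PySem.Str.len s > 6 then ls
    else pvFindClose ls

-- ===== PRECONDITION & SPEC =====
def Spec_strip_module_docstring_py (body_lines : List String) (out : List String) : Prop := out = strip_module_docstring_py_alt body_lines
instance (body_lines : List String) (out : List String) : Decidable (Spec_strip_module_docstring_py body_lines out) := by unfold Spec_strip_module_docstring_py; infer_instance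

-- ===== CLAIM (what is proved, stated in full; the proofs are below) =====
def Claim_equal_strip_module_docstring_py : Prop := ∀ (body_lines : List String), Dom_strip_module_docstring_py body_lines → Spec_strip_module_docstring_py body_lines (strip_module_docstring_py body_lines)

-- ===== LEMMAS AND PROOFS =====

theorem pvStartswithNil : PySem.Chars.startswith [] ['\"', '\"', '\"'] = false := by decide

-- once docstring_done is true, A appends every remaining line
theorem pvFoldA_done (xs : List String) (res : List String) (b : Bool) :
    xs.foldl pvStepA (res, b, true) = (res ++ xs, b, true) := by
  induction xs generalizing res with
  | nil => simp
  | cons l ls ih =>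
    simp only [List.foldl_cons, pvStepA]
    simpa using ih (res ++ [l])

-- while in_docstring and not done, A skips lines until one ends with '"""', then appends the rest
theorem pvFoldA_inDoc (xs : List String) (res : List String) :
    (xs.foldl pvStepA (res, true, false)).1 = res ++ pvFindClose xs := by
  induction xs generalizing res with
  | nil => simp [pvFindClose]
  | cons l ls ih =>
    simp only [List.foldl_cons, pvFindClose]
    by_cases h : PySem.Chars.endswith (PySem.Chars.strip l.toList) ['\"', '\"', '\"'] = true
    · simp [pvStepA, h, pvFoldA_done]
    · simp only [Bool.not_eq_true] at h
      simp [pvStepA, h, ih]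

theorem pvFoldA_fresh (xs : List String) :
    (xs.foldl pvStepA ([], false, false)).1 = strip_module_docstring_py_alt xs := by
  induction xs with
  | nil => simp [strip_module_docstring_py_alt, pvSkipBlank]
  | cons l ls ih =>
    simp only [List.foldl_cons]
    by_cases hb : PySem.Str.strip l = ""
    · -- blank line: A's state is unchanged, B skips it
      have hstep : pvStepA ([], false, false) l = ([], false, false) := by
        simp [pvStepA, hb, pvStartswithNil]
      rw [hstep, ih]
      simp [strip_module_docstring_py_alt, pvSkipBlank, hb]
    · by_cases hs : PySem.Chars.startswith (PySem.Chars.strip l.toList) ['\"', '\"', '\"'] = true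
      · by_cases hc : PySem.Chars.endswith (PySem.Chars.strip l.toList) ['\"', '\"', '\"'] = true ∧
            6 < (PySem.Chars.strip l.toList).length
        · -- single-line docstring
          have hstep : pvStepA ([], false, false) l = ([], true, true) := by
            simp [pvStepA, hs, hc.1, hc.2]
          rw [hstep, pvFoldA_done]
          simp [strip_module_docstring_py_alt, pvSkipBlank, hb, hs, hc.1, hc.2]
        · -- multi-line opener
          have hcb : (PySem.Chars.endswith (PySem.Chars.strip l.toList) ['\"', '\"', '\"'] &&
              decide (6 < (PySem.Chars.strip l.toList).length)) = false := by
            rcases Decidable.not_and_iff_not_or_not.mp hc with h | h <;> simp [h]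
          have hstep : pvStepA ([], false, false) l = ([], true, false) := by
            simp [pvStepA, hs, hcb]
          rw [hstep, pvFoldA_inDoc]
          simp [strip_module_docstring_py_alt, pvSkipBlank, hb, hs, hc]
      · -- ordinary code line
        simp only [Bool.not_eq_true] at hs
        have hstep : pvStepA ([], false, false) l = ([l], false, true) := by
          simp [pvStepA, hs, hb]
        rw [hstep, pvFoldA_done]
        simp [strip_module_docstring_py_alt, pvSkipBlank, hb, hs]

-- ===== VERDICT (by name: the statement is the Claim_ definition above) =====
theorem strip_module_docstring_py_spec : Claim_equal_strip_module_docstring_py := by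
  intro body_lines _
  show strip_module_docstring_py body_lines = strip_module_docstring_py_alt body_lines
  exact pvFoldA_fresh body_lines
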